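-- pv_equiv track=rewrite | github.com/ConvLab/ConvLab-3 | convlab/base_models/t5/mdst/utils.py | filter_by_full_state
-- ===== SOURCE A (Python) =====
-- def filter_by_full_state(state, full_state):
--     # filter out invalid domain-slot key according to ontology
--     for domain in list(state.keys()):
--         if domain not in full_state:
--             state.pop(domain)
--             continue
--         for slot in list(state[domain].keys()):
--             if slot not in full_state[domain]:
--                 state[domain].pop(slot)
--         if len(state[domain]) == 0:
--             state.pop(domain)
--     return state
-- ===== SOURCE B (Python) =====
-- def filter_by_full_state(state, full_state):
--     # build a filtered copy with comprehensions, then reinstall it in place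
--     filtered = {
--         domain: {slot: value for slot, value in slots.items() if slot in full_state[domain]}
--         for domain, slots in state.items()
--         if domain in full_state
--     }
--     state.clear()
--     state.update({d: s for d, s in filtered.items() if s})
--     return state
-- ===== Notes on version B (the rewrite author's own statement) =====
-- stated objective: simpler
-- what changed: Replaces the destructive in-place key-popping traversal with building a filtered copy via nested comprehensions and reinstalling it with state.clear()/state.update(), preserving the caller's object identity.
import Mathlib
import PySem

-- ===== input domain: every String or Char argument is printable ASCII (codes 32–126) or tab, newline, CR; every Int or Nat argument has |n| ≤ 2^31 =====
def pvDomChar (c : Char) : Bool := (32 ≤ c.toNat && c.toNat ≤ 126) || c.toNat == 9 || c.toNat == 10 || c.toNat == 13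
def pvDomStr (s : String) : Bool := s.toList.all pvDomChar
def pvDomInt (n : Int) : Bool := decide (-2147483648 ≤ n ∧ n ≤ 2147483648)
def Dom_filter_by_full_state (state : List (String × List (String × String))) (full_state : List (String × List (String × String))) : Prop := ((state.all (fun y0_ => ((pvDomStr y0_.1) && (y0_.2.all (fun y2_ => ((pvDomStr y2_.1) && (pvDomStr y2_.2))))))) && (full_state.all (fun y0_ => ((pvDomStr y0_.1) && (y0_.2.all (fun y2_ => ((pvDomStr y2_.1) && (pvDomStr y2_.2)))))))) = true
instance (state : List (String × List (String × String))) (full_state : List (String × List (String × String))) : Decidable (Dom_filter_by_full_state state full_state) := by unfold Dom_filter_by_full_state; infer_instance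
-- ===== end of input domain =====

-- B builds a filtered copy (comprehension-style filterMap/filter) instead of A's
-- destructive in-place key-popping traversal; objective: simpler. (Both Pythons
-- mutate `state` in place and return it; the equivalence here is about the value.)

-- ===== PORT A =====
-- first-match association-list lookup (dict subscript; keys are unique under Pre_)
def aGetFirst {α : Type} (l : List (String × α)) (k : String) : Option α :=
  match l with
  | [] => none
  | (d, v) :: rest => if d = k then some v else aGetFirst rest k

-- dict.pop(k): remove the (first = only) entry with key k
def aEraseKey {α : Type} (l : List (String × α)) (k : String) : List (String × α) :=
  match l with
  | [] => []
  | (d, v) :: rest => if d = k then rest else (d, v) :: aEraseKey rest k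

-- in-place overwrite of the value stored at key k (state[domain] mutated)
def aSetKey {α : Type} (l : List (String × α)) (k : String) (w : α) : List (String × α) :=
  match l with
  | [] => []
  | (d, v) :: rest => if d = k then (d, w) :: rest else (d, v) :: aSetKey rest k w

-- 'slot in full_state[domain]'
def aHasKey (l : List (String × String)) (k : String) : Bool := l.any (fun p => p.1 = k)

-- inner loop of A: for slot in list(state[domain].keys()): if slot not in fsl: pop
def aInnerLoop (fsl : List (String × String)) (slots : List (String × String)) : List (String × String) :=
  (slots.map Prod.fst).foldl (fun sl s => if aHasKey fsl s then sl else aEraseKey sl s) slots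

def filter_by_full_state (state : List (String × List (String × String))) (full_state : List (String × List (String × String))) : List (String × List (String × String)) :=
  (state.map Prod.fst).foldl (fun st d =>
    match aGetFirst full_state d with
    | none => aEraseKey st d                 -- domain not in full_state: state.pop(domain)
    | some fsl =>
      match aGetFirst st d with
      | none => st                            -- unreachable under Pre_ (key still present)
      | some slots =>
        let slots' := aInnerLoop fsl slots
        let st' := aSetKey st d slots'
        if slots'.length = 0 then aEraseKey st' d else st') state

-- ===== PORT B =====
def filter_by_full_state_alt (state : List (String × List (String × String))) (full_state : List (String × List (String × String))) : List (String × List (String × String)) :=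
  state.filterMap (fun dp =>
    match aGetFirst full_state dp.1 with
    | none => none
    | some fsl =>
      let inner := dp.2.filter (fun sp => aHasKey fsl sp.1)
      if inner.isEmpty then none else some (dp.1, inner))

-- ===== PRECONDITION & SPEC =====
-- Pre_ requires unique keys at each dict level of `state`: the association lists model
-- Python dicts, which cannot hold duplicate keys, so duplicate-key lists correspond to
-- no Python input at all (no input A returns on is excluded).
def Pre_filter_by_full_state (state : List (String × List (String × String))) (full_state : List (String × List (String × String))) : Prop :=
  (state.map Prod.fst).Nodup ∧ ∀ p ∈ state, (p.2.map Prod.fst).Nodup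
instance (state : List (String × List (String × String))) (full_state : List (String × List (String × String))) : Decidable (Pre_filter_by_full_state state full_state) := by unfold Pre_filter_by_full_state; infer_instance

def pvWitness_filter_by_full_state : (List (String × List (String × String))) × (List (String × List (String × String))) :=
  ([("hotel", [("area", "north"), ("stars", "4")]), ("taxi", [("to", "bar")])],
   [("hotel", [("area", ""), ("price", "")])])

def Spec_filter_by_full_state (state : List (String × List (String × String))) (full_state : List (String × List (String × String))) (out : List (String × List (String × String))) : Prop := out = filter_by_full_state_alt state full_state
instance (state : List (String × List (String × String))) (full_state : List (String × List (String × String))) (out : List (String × List (String × String))) : Decidable (Spec_filter_by_full_state state full_state out) := by unfold Spec_filter_by_full_state; infer_instance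

-- ===== CLAIM (what is proved, stated in full; the proofs are below) =====
def Claim_equal_filter_by_full_state : Prop := ∀ (state : List (String × List (String × String))) (full_state : List (String × List (String × String))), Dom_filter_by_full_state state full_state → Pre_filter_by_full_state state full_state → Spec_filter_by_full_state state full_state (filter_by_full_state state full_state)

-- ===== LEMMAS AND PROOFS =====

theorem getFirst_append_not {α : Type} (pre l : List (String × α)) (k : String)
    (h : ∀ p ∈ pre, p.1 ≠ k) : aGetFirst (pre ++ l) k = aGetFirst l k := by
  induction pre with
  | nil => rfl
  | cons p pre ih =>
      simp only [List.cons_append, aGetFirst]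
      rw [if_neg (h p (List.mem_cons_self))]
      exact ih (fun q hq => h q (List.mem_cons_of_mem _ hq))

theorem eraseKey_append_not {α : Type} (pre l : List (String × α)) (k : String)
    (h : ∀ p ∈ pre, p.1 ≠ k) : aEraseKey (pre ++ l) k = pre ++ aEraseKey l k := by
  induction pre with
  | nil => rfl
  | cons p pre ih =>
      simp only [List.cons_append, aEraseKey]
      rw [if_neg (h p (List.mem_cons_self))]
      rw [ih (fun q hq => h q (List.mem_cons_of_mem _ hq))]

theorem setKey_append_not {α : Type} (pre l : List (String × α)) (k : String) (w : α)
    (h : ∀ p ∈ pre, p.1 ≠ k) : aSetKey (pre ++ l) k w = pre ++ aSetKey l k w := by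
  induction pre with
  | nil => rfl
  | cons p pre ih =>
      simp only [List.cons_append, aSetKey]
      rw [if_neg (h p (List.mem_cons_self))]
      rw [ih (fun q hq => h q (List.mem_cons_of_mem _ hq))]

-- erase-by-iterated-keys loop = filter, over any already-kept prefix `pre`
theorem inner_loop_general (p : String → Bool) (pre rest : List (String × String))
    (hnd : ((pre ++ rest).map Prod.fst).Nodup) :
    (rest.map Prod.fst).foldl (fun sl s => if p s then sl else aEraseKey sl s) (pre ++ rest)
      = pre ++ rest.filter (fun sp => p sp.1) := by
  induction rest generalizing pre with
  | nil => simp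
  | cons q rest ih =>
      have hq : ∀ r ∈ pre, r.1 ≠ q.1 := by
        intro r hr
        have h := hnd
        rw [List.map_append] at h
        exact (List.nodup_append.mp h).2.2 r.1 (List.mem_map_of_mem hr) q.1 (by simp)
      simp only [List.map_cons, List.foldl_cons, List.filter_cons]
      by_cases hp : p q.1
      · rw [if_pos hp, if_pos hp]
        have : pre ++ q :: rest = (pre ++ [q]) ++ rest := by simp
        rw [this]
        have h2 : (((pre ++ [q]) ++ rest).map Prod.fst).Nodup := by
          simpa using hnd
        rw [ih (pre ++ [q]) h2]; simp
      · rw [if_neg hp, if_neg (by simpa using hp)]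
        have he : aEraseKey (pre ++ q :: rest) q.1 = pre ++ rest := by
          rw [eraseKey_append_not _ _ _ hq]
          simp [aEraseKey]
        rw [he]
        have h2 : ((pre ++ rest).map Prod.fst).Nodup := by
          exact hnd.sublist (((List.sublist_cons_self q rest).append_left pre).map Prod.fst)
        exact ih pre h2

theorem inner_loop_filter (fsl slots : List (String × String))
    (hnd : (slots.map Prod.fst).Nodup) :
    aInnerLoop fsl slots = slots.filter (fun sp => aHasKey fsl sp.1) := by
  have := inner_loop_general (fun s => aHasKey fsl s) [] slots (by simpa using hnd)
  simpa [aInnerLoop] using this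

-- the outer loop over an already-processed prefix `pre`
theorem outer_loop_general (full_state : List (String × List (String × String)))
    (pre rest : List (String × List (String × String)))
    (hnd : ((pre ++ rest).map Prod.fst).Nodup)
    (hin : ∀ p ∈ rest, (p.2.map Prod.fst).Nodup) :
    (rest.map Prod.fst).foldl (fun st d =>
      match aGetFirst full_state d with
      | none => aEraseKey st d
      | some fsl =>
        match aGetFirst st d with
        | none => st
        | some slots =>
          let slots' := aInnerLoop fsl slots
          let st' := aSetKey st d slots'
          if slots'.length = 0 then aEraseKey st' d else st') (pre ++ rest)
      = pre ++ filter_by_full_state_alt rest full_state := by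
  induction rest generalizing pre with
  | nil => simp [filter_by_full_state_alt]
  | cons q rest ih =>
      have hq : ∀ r ∈ pre, r.1 ≠ q.1 := by
        intro r hr
        have h := hnd
        rw [List.map_append] at h
        exact (List.nodup_append.mp h).2.2 r.1 (List.mem_map_of_mem hr) q.1 (by simp)
      have hndtail : ((pre ++ rest).map Prod.fst).Nodup :=
        hnd.sublist (((List.sublist_cons_self q rest).append_left pre).map Prod.fst)
      have hintail : ∀ p ∈ rest, (p.2.map Prod.fst).Nodup :=
        fun p hp => hin p (List.mem_cons_of_mem _ hp)
      simp only [List.map_cons, List.foldl_cons, filter_by_full_state_alt, List.filterMap_cons]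
      cases hfs : aGetFirst full_state q.1 with
      | none =>
          have he : aEraseKey (pre ++ q :: rest) q.1 = pre ++ rest := by
            rw [eraseKey_append_not _ _ _ hq]; simp [aEraseKey]
          rw [he, ih pre hndtail hintail]
          simp [filter_by_full_state_alt]
      | some fsl =>
          have hg : aGetFirst (pre ++ q :: rest) q.1 = some q.2 := by
            rw [getFirst_append_not _ _ _ hq]; simp [aGetFirst]
          rw [hg]
          have hfilt := inner_loop_filter fsl q.2 (hin q (List.mem_cons_self))
          have hset : aSetKey (pre ++ q :: rest) q.1 (aInnerLoop fsl q.2)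
              = pre ++ (q.1, aInnerLoop fsl q.2) :: rest := by
            rw [setKey_append_not _ _ _ _ hq]; simp [aSetKey]
          simp only [hset]
          by_cases hz : (aInnerLoop fsl q.2).length = 0
          · rw [if_pos hz]
            have he : aEraseKey (pre ++ (q.1, aInnerLoop fsl q.2) :: rest) q.1 = pre ++ rest := by
              rw [eraseKey_append_not _ _ _ hq]; simp [aEraseKey]
            rw [he, ih pre hndtail hintail]
            have hnil : aInnerLoop fsl q.2 = [] := List.eq_nil_of_length_eq_zero hz
            have : (q.2.filter (fun sp => aHasKey fsl sp.1)).isEmpty = true := by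
              rw [← hfilt, hnil]; rfl
            simp [filter_by_full_state_alt, this]
          · rw [if_neg hz]
            have hpre2 : pre ++ (q.1, aInnerLoop fsl q.2) :: rest
                = (pre ++ [(q.1, aInnerLoop fsl q.2)]) ++ rest := by simp
            have hnd2 : (((pre ++ [(q.1, aInnerLoop fsl q.2)]) ++ rest).map Prod.fst).Nodup := by
              simpa using hnd
            rw [hpre2, ih (pre ++ [(q.1, aInnerLoop fsl q.2)]) hnd2 hintail]
            have : (q.2.filter (fun sp => aHasKey fsl sp.1)).isEmpty = false := by
              rw [← hfilt]
              cases h' : aInnerLoop fsl q.2 with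
              | nil => exact absurd (by rw [h']; rfl) hz
              | cons _ _ => rfl
            simp [filter_by_full_state_alt, this, hfilt]

-- ===== VERDICT (by name: the statement is the Claim_ definition above) =====
theorem filter_by_full_state_spec : Claim_equal_filter_by_full_state := by
  intro state full_state _ hpre
  unfold Spec_filter_by_full_state filter_by_full_state
  have := outer_loop_general full_state [] state (by simpa using hpre.1) hpre.2
  simpa using this
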